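-- pv_equiv track=rewrite | github.com/sraod7/problem_solving | knapsack_bf.py | knapsack_bf
-- ===== SOURCE A (Python) =====
-- def knapsack_bf(ws, ps, c):
--     """ws -> weights and ps -> profits and c -> capacity"""
--     res = []
--     for i in range(len(ws)):
--         for j in range(i + 1, len(ws)):
--             if ws[i] + ws[j] <= c:
--                 res.append([i, j, ws[i], ws[j], ps[i] + ps[j]])
--
--     res.sort(key=lambda x: -x[4])
--
--     return res[0]
-- ===== SOURCE B (Python) =====
-- def knapsack_bf(ws, ps, c):
--     """ws -> weights and ps -> profits and c -> capacity"""
--     n = len(ws)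
--     best = bestp = None
--     for i in range(n):
--         wi = ws[i]
--         for j in range(i + 1, n):
--             if wi + ws[j] <= c:
--                 p = ps[i] + ps[j]
--                 if bestp is None or p > bestp:
--                     best = [i, j, wi, ws[j], p]
--                     bestp = p
--     return best
-- ===== Notes on version B (the rewrite author's own statement) =====
-- stated objective: alternative
-- what changed: B replaces A's build-all-pairs-then-stable-sort-and-take-first with a single running-argmax accumulator over the same pair scan (strict '>' keeps the first maximal pair, matching the stable sort's tie-break), so no pair list is materialized and no sort is performed.
import Mathlib
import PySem

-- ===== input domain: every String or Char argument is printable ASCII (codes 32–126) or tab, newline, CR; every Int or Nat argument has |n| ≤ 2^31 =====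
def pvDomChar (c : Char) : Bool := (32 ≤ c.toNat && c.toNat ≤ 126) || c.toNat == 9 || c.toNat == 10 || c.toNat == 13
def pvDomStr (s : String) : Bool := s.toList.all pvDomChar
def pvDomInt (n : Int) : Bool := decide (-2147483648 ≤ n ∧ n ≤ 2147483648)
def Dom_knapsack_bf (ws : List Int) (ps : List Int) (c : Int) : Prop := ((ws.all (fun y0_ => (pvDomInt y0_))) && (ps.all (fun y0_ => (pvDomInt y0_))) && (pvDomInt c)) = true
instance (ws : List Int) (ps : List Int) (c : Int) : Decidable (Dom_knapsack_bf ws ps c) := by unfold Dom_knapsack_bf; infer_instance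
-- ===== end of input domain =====

-- B replaces A's build-all-pairs-then-stable-sort-and-take-first with a running argmax over
-- the same pair scan (strict '>' keeps the first maximum, matching the stable sort's
-- tie-break): an alternative structure with no materialized pair list and no sort.

-- ===== PORT A =====
def knapsack_bf (ws : List Int) (ps : List Int) (c : Int) : List Int :=
  let res : List (List Int) :=
    (PySem.List.pyRange 0 (PySem.List.len ws) 1).foldl (fun res i =>
      (PySem.List.pyRange (i + 1) (PySem.List.len ws) 1).foldl (fun res j =>
        if PySem.List.pyGetD ws i 0 + PySem.List.pyGetD ws j 0 ≤ c then
          res ++ [[i, j, PySem.List.pyGetD ws i 0, PySem.List.pyGetD ws j 0,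
                   PySem.List.pyGetD ps i 0 + PySem.List.pyGetD ps j 0]]
        else res) res) []
  let res := PySem.List.sorted res (fun x => -(PySem.List.pyGetD x 4 0)) false
  -- res[0]: IndexError when res = [] — excluded by Pre_knapsack_bf
  PySem.List.pyGetD res 0 []

-- ===== PORT B =====
def knapsack_bf_alt (ws : List Int) (ps : List Int) (c : Int) : List Int :=
  let best : Option (List Int × Int) :=
    (PySem.List.pyRange 0 (PySem.List.len ws) 1).foldl (fun best i =>
      let wi := PySem.List.pyGetD ws i 0
      (PySem.List.pyRange (i + 1) (PySem.List.len ws) 1).foldl (fun best j =>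
        if wi + PySem.List.pyGetD ws j 0 ≤ c then
          let p := PySem.List.pyGetD ps i 0 + PySem.List.pyGetD ps j 0
          match best with
          | none => some ([i, j, wi, PySem.List.pyGetD ws j 0, p], p)
          | some (b, bp) => if p > bp then some ([i, j, wi, PySem.List.pyGetD ws j 0, p], p) else some (b, bp)
        else best) best) none
  match best with
  | some (b, _) => b
  | none => []   -- Python B returns None here; outside Pre_knapsack_bf

-- ===== PRECONDITION & SPEC =====
-- Pre_ excludes exactly the inputs on which the Python A raises IndexError: those with no
-- feasible pair i<j (res[0] of an empty list) and those where some feasible pair indexes ps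
-- out of range (len(ps) too short).
def Pre_knapsack_bf (ws : List Int) (ps : List Int) (c : Int) : Prop :=
  (∃ i ∈ List.range ws.length, ∃ j ∈ List.range ws.length, i < j ∧ ws.getD i 0 + ws.getD j 0 ≤ c)
  ∧ ∀ i ∈ List.range ws.length, ∀ j ∈ List.range ws.length,
      i < j → ws.getD i 0 + ws.getD j 0 ≤ c → j < ps.length
instance (ws : List Int) (ps : List Int) (c : Int) : Decidable (Pre_knapsack_bf ws ps c) := by
  unfold Pre_knapsack_bf; infer_instance

def pvWitness_knapsack_bf : List Int × List Int × Int := ([1, 2], [3, 4], 5)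

def Spec_knapsack_bf (ws : List Int) (ps : List Int) (c : Int) (out : List Int) : Prop := out = knapsack_bf_alt ws ps c
instance (ws : List Int) (ps : List Int) (c : Int) (out : List Int) : Decidable (Spec_knapsack_bf ws ps c out) := by unfold Spec_knapsack_bf; infer_instance

-- ===== CLAIM (what is proved, stated in full; the proofs are below) =====
def Claim_equal_knapsack_bf : Prop := ∀ (ws : List Int) (ps : List Int) (c : Int), Dom_knapsack_bf ws ps c → Pre_knapsack_bf ws ps c → Spec_knapsack_bf ws ps c (knapsack_bf ws ps c)

-- ===== LEMMAS AND PROOFS =====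

-- key coordinate the sort and the running max both look at
def pvKey4 (x : List Int) : Int := PySem.List.pyGetD x 4 0

lemma pvKey4_item (i j a b p : Int) : pvKey4 [i, j, a, b, p] = p := rfl

-- the running-max step, phrased on the produced item
def pvG (s : Option (List Int × Int)) (x : List Int) : Option (List Int × Int) :=
  match s with
  | none => some (x, pvKey4 x)
  | some (b, bp) => if pvKey4 x > bp then some (x, pvKey4 x) else some (b, bp)

-- fusing a fold that appends items with the running-max fold over the appended list
lemma pv_fuse (L : List Int) (FA : List (List Int) → Int → List (List Int))
    (FB : Option (List Int × Int) → Int → Option (List Int × Int))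
    (h : ∀ r x, FB (r.foldl pvG none) x = (FA r x).foldl pvG none) :
    ∀ r, L.foldl FB (r.foldl pvG none) = (L.foldl FA r).foldl pvG none := by
  induction L with
  | nil => intro r; rfl
  | cons x L ih => intro r; simp only [List.foldl_cons]; rw [h]; exact ih (FA r x)

-- unfolding equation for PySem.List.insertBy (definitional)
lemma pv_insertBy_cons (before : List Int → List Int → Bool) (x y : List Int) (t : List (List Int)) :
    PySem.List.insertBy before x (y :: t)
      = if before x y then x :: y :: t else y :: PySem.List.insertBy before x t := rfl

-- head of the stable insertion sort vs the running max: one step preserved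
lemma pv_inv (res : List (List Int)) :
    ∀ (acc : List (List Int)) (s : Option (List Int × Int)),
      acc.head? = s.map Prod.fst →
      (∀ b bp, s = some (b, bp) → bp = pvKey4 b) →
      ((res.foldl (fun acc x =>
          PySem.List.insertBy (fun a b =>
            decide (-(PySem.List.pyGetD a 4 0) < -(PySem.List.pyGetD b 4 0))) x acc) acc).head?
        = (res.foldl pvG s).map Prod.fst)
      ∧ ∀ b bp, res.foldl pvG s = some (b, bp) → bp = pvKey4 b := by
  induction res with
  | nil => intro acc s h1 h2; exact ⟨h1, h2⟩
  | cons x res ih =>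
    intro acc s h1 h2
    simp only [List.foldl_cons]
    apply ih
    · -- one step keeps the head relation
      cases s with
      | none =>
        have hacc : acc = [] := by
          cases acc with
          | nil => rfl
          | cons a t => simp at h1
        subst hacc
        rfl
      | some bb =>
        obtain ⟨b, bp⟩ := bb
        have hbp : bp = pvKey4 b := h2 b bp rfl
        obtain ⟨t, ht⟩ : ∃ t, acc = b :: t := by
          cases acc with
          | nil => simp at h1
          | cons a t => simp at h1; exact ⟨t, by rw [h1]⟩
        subst ht hbp
        rw [pv_insertBy_cons]
        have hcond : (decide (-(PySem.List.pyGetD x 4 0) < -(PySem.List.pyGetD b 4 0)))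
            = decide (pvKey4 x > pvKey4 b) := by
          simp [pvKey4]
        rw [hcond]
        by_cases hgt : pvKey4 x > pvKey4 b
        · simp [pvG, hgt]
        · simp [pvG, hgt]
    · -- one step keeps the snd = key invariant
      intro b bp hb
      cases s with
      | none =>
        simp only [pvG] at hb
        cases hb
        rfl
      | some bb =>
        obtain ⟨b0, bp0⟩ := bb
        have hbp0 : bp0 = pvKey4 b0 := h2 b0 bp0 rfl
        simp only [pvG] at hb
        split at hb <;> (cases hb; first | rfl | exact hbp0)

theorem pv_main (ws ps : List Int) (c : Int) :
    knapsack_bf ws ps c = knapsack_bf_alt ws ps c := by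
  simp only [knapsack_bf, knapsack_bf_alt]
  rw [PySem.List.sorted_eq_foldl_insertBy]
  -- fuse B's nested fold into the running max over A's generated list
  have hB :
      ((PySem.List.pyRange 0 (PySem.List.len ws) 1).foldl (fun best i =>
        (PySem.List.pyRange (i + 1) (PySem.List.len ws) 1).foldl (fun best j =>
          if PySem.List.pyGetD ws i 0 + PySem.List.pyGetD ws j 0 ≤ c then
            match best with
            | none => some ([i, j, PySem.List.pyGetD ws i 0, PySem.List.pyGetD ws j 0,
                PySem.List.pyGetD ps i 0 + PySem.List.pyGetD ps j 0],
                PySem.List.pyGetD ps i 0 + PySem.List.pyGetD ps j 0)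
            | some (b, bp) =>
              if PySem.List.pyGetD ps i 0 + PySem.List.pyGetD ps j 0 > bp then
                some ([i, j, PySem.List.pyGetD ws i 0, PySem.List.pyGetD ws j 0,
                  PySem.List.pyGetD ps i 0 + PySem.List.pyGetD ps j 0],
                  PySem.List.pyGetD ps i 0 + PySem.List.pyGetD ps j 0)
              else some (b, bp)
          else best) best) none)
      = (((PySem.List.pyRange 0 (PySem.List.len ws) 1).foldl (fun res i =>
          (PySem.List.pyRange (i + 1) (PySem.List.len ws) 1).foldl (fun res j =>
            if PySem.List.pyGetD ws i 0 + PySem.List.pyGetD ws j 0 ≤ c then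
              res ++ [[i, j, PySem.List.pyGetD ws i 0, PySem.List.pyGetD ws j 0,
                PySem.List.pyGetD ps i 0 + PySem.List.pyGetD ps j 0]]
            else res) res) ([] : List (List Int))).foldl pvG none) := by
    exact pv_fuse _ _ _
      (fun r i => pv_fuse _ _ _
        (fun r' j => by
          by_cases hc : PySem.List.pyGetD ws i 0 + PySem.List.pyGetD ws j 0 ≤ c
          · simp only [if_pos hc, List.foldl_append, List.foldl_cons, List.foldl_nil]
            cases hs : r'.foldl pvG none with
            | none => simp [pvG, pvKey4_item]
            | some bb => obtain ⟨b, bp⟩ := bb; simp [pvG, pvKey4_item]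
          · simp only [if_neg hc]) r) []
  rw [hB]
  obtain ⟨H1, -⟩ := pv_inv
    (((PySem.List.pyRange 0 (PySem.List.len ws) 1).foldl (fun res i =>
        (PySem.List.pyRange (i + 1) (PySem.List.len ws) 1).foldl (fun res j =>
          if PySem.List.pyGetD ws i 0 + PySem.List.pyGetD ws j 0 ≤ c then
            res ++ [[i, j, PySem.List.pyGetD ws i 0, PySem.List.pyGetD ws j 0,
              PySem.List.pyGetD ps i 0 + PySem.List.pyGetD ps j 0]]
          else res) res) ([] : List (List Int))))
    [] none rfl (by intro b bp h; simp at h)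
  have hhead : ∀ (L : List (List Int)), PySem.List.pyGetD L 0 [] = L.head?.getD [] := by
    intro L
    cases L with
    | nil => simp [PySem.List.pyGetD, PySem.List.pyGet?]
    | cons a t => simp only [PySem.List.pyGetD_zero_cons, List.head?_cons, Option.getD_some]
  have hopt : ∀ (o : Option (List Int × Int)),
      (o.map Prod.fst).getD []
        = match o with | some (b, _) => b | none => ([] : List Int) := by
    intro o; cases o with
    | none => rfl
    | some bb => obtain ⟨b, bp⟩ := bb; rfl
  rw [hhead, H1]
  exact hopt _

-- ===== VERDICT (by name: the statement is the Claim_ definition above) =====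
theorem knapsack_bf_spec : Claim_equal_knapsack_bf := by
  intro ws ps c _ _
  unfold Spec_knapsack_bf
  exact pv_main ws ps c
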